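-- pv_equiv track=rewrite | github.com/IrinaMaul/games | game_of_life/main.py | formatCells
-- ===== SOURCE A (Python) =====
-- def formatCells(cell_string):#unterscheidet die eingegebenen Charaktere um eine Liste zu erstellen
--    result = [[]]
--    row = 0
--    for char in cell_string:
--       if char == ' ':
--          result[row].append(' ')
--       if char == 'x':
--          result[row].append('x')
--       if char == ',':
--          row = row + 1
--          result.append([]) #neue liste (unten) hinzugefügt
--    return result
-- ===== SOURCE B (Python) =====
-- def formatCells(cell_string):
--     # Scan the string BACKWARDS, building the rows back-to-front:
--     # cur collects the (reversed) cells of the row currently being read,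
--     # rev_rows collects finished rows in reverse row order; one final
--     # reversal of the row list and of each row yields the result.
--     rev_rows = []
--     cur = []
--     for c in reversed(cell_string):
--         if c == ',':
--             rev_rows.append(cur)
--             cur = []
--         elif c == ' ' or c == 'x':
--             cur.append(c)
--     rev_rows.append(cur)
--     rev_rows.reverse()
--     for r in rev_rows:
--         r.reverse()
--     return rev_rows
-- ===== Notes on version B (the rewrite author's own statement) =====
-- stated objective: alternative
-- what changed: A makes one forward pass keeping a row cursor into a growing list and appending into the indexed row; B scans the string backwards building the rows back-to-front (finishing a row when it meets its leading comma) and reverses the row list and each row at the end.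
import Mathlib
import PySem

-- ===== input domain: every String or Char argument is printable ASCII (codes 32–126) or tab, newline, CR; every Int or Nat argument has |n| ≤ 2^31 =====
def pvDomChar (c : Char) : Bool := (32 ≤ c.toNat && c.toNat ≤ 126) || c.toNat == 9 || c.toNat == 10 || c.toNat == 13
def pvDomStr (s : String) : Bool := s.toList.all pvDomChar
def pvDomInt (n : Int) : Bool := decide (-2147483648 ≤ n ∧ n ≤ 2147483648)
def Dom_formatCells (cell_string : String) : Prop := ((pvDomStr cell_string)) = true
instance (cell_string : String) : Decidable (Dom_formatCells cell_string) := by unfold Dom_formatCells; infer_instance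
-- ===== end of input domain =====

-- B replaces A's forward pass with a row cursor into a growing list by a BACKWARDS scan
-- that builds the rows back-to-front and reverses them at the end; objective: alternative.

-- ===== PORT A =====
-- one loop step of A: the three independent `if`s on the current character
def formatCellsStep (st : List (List String) × Nat) (char : Char) : List (List String) × Nat :=
  let result := if char == ' ' then st.1.modify st.2 (· ++ [" "]) else st.1
  let result := if char == 'x' then result.modify st.2 (· ++ ["x"]) else result
  if char == ',' then (result ++ [[]], st.2 + 1) else (result, st.2)

def formatCells (cell_string : String) : List (List String) :=
  (cell_string.toList.foldl formatCellsStep ([[]], 0)).1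

-- ===== PORT B =====
-- one step of B's backwards loop: state = (finished rows in reverse order, current reversed row)
def formatCellsAltStep (st : List (List String) × List String) (c : Char) :
    List (List String) × List String :=
  if c == ',' then (st.1 ++ [st.2], [])
  else if c == ' ' || c == 'x' then (st.1, st.2 ++ [String.ofList [c]])
  else st

def formatCells_alt (cell_string : String) : List (List String) :=
  let st := cell_string.toList.reverse.foldl formatCellsAltStep ([], [])
  let revRows := st.1 ++ [st.2]
  revRows.reverse.map List.reverse

-- ===== PRECONDITION & SPEC =====
def Spec_formatCells (cell_string : String) (out : List (List String)) : Prop := out = formatCells_alt cell_string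
instance (cell_string : String) (out : List (List String)) : Decidable (Spec_formatCells cell_string out) := by unfold Spec_formatCells; infer_instance

-- ===== CLAIM (what is proved, stated in full; the proofs are below) =====
def Claim_equal_formatCells : Prop := ∀ (cell_string : String), Dom_formatCells cell_string → Spec_formatCells cell_string (formatCells cell_string)

-- ===== LEMMAS AND PROOFS =====

-- reference splitter: (first segment, remaining segments) of cs split on ','
def pvSp : List Char → List Char × List (List Char)
  | [] => ([], [])
  | c :: cs =>
      let p := pvSp cs
      if c = ',' then ([], p.1 :: p.2) else (c :: p.1, p.2)

-- the cells a segment contributes: keep exactly ' ' and 'x', as 1-char strings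
def pvRow (seg : List Char) : List String :=
  (seg.filter (fun c => c == ' ' || c == 'x')).map (fun c => String.ofList [c])

theorem pvModify_last {α : Type} (done : List α) (cur : α) (f : α → α) :
    (done ++ [cur]).modify done.length f = done ++ [f cur] := by
  induction done with
  | nil => simp [List.modify]
  | cons d ds ih =>
      simp only [List.modify] at ih
      simp [List.modify, ih]

theorem pvFold_spec (cs : List Char) : ∀ (done : List (List String)) (cur : List String),
    (List.foldl formatCellsStep (done ++ [cur], done.length) cs).1
      = done ++ (cur ++ pvRow (pvSp cs).1) :: (pvSp cs).2.map pvRow := by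
  induction cs with
  | nil => intro done cur; simp [pvSp, pvRow]
  | cons c rest ih =>
      intro done cur
      by_cases hc : c = ','
      · subst hc
        rw [show List.foldl formatCellsStep (done ++ [cur], done.length) (',' :: rest)
              = List.foldl formatCellsStep ((done ++ [cur]) ++ [[]], (done ++ [cur]).length) rest by
            simp [formatCellsStep]]
        rw [ih (done ++ [cur]) []]
        simp [pvSp, pvRow]
      · by_cases hs : c = ' '
        · subst hs
          rw [show List.foldl formatCellsStep (done ++ [cur], done.length) (' ' :: rest)
                = List.foldl formatCellsStep (done ++ [cur ++ [" "]], done.length) rest by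
              simp [formatCellsStep, pvModify_last]]
          rw [ih done (cur ++ [" "])]
          simp only [pvSp, pvRow]
          simp [show String.ofList [' '] = " " from rfl]
        · by_cases hx : c = 'x'
          · subst hx
            rw [show List.foldl formatCellsStep (done ++ [cur], done.length) ('x' :: rest)
                  = List.foldl formatCellsStep (done ++ [cur ++ ["x"]], done.length) rest by
                simp [formatCellsStep, pvModify_last]]
            rw [ih done (cur ++ ["x"])]
            simp only [pvSp, pvRow]
            simp [show String.ofList ['x'] = "x" from rfl]
          · rw [show List.foldl formatCellsStep (done ++ [cur], done.length) (c :: rest)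
                  = List.foldl formatCellsStep (done ++ [cur], done.length) rest by
                simp [formatCellsStep, hc, hs, hx]]
            rw [ih done cur]
            simp [pvSp, pvRow, hc, hs, hx]

-- B's backwards foldl, seen as a foldr, computes the reversed rows of pvSp
theorem pvFoldr_spec (cs : List Char) :
    List.foldr (fun c st => formatCellsAltStep st c) ([], []) cs
      = (((pvSp cs).2.map (fun s => (pvRow s).reverse)).reverse, (pvRow (pvSp cs).1).reverse) := by
  induction cs with
  | nil => simp [pvSp, pvRow]
  | cons c rest ih =>
      rw [List.foldr_cons, ih]
      by_cases hc : c = ','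
      · subst hc
        simp [formatCellsAltStep, pvSp, pvRow]
      · by_cases hs : c = ' '
        · subst hs
          simp only [formatCellsAltStep, pvSp, pvRow]
          simp
        · by_cases hx : c = 'x'
          · subst hx
            simp only [formatCellsAltStep, pvSp, pvRow]
            simp
          · simp [formatCellsAltStep, pvSp, pvRow, hc, hs, hx]

theorem pvAlt_eq (cs : List Char) :
    formatCells_alt (String.ofList cs) = pvRow (pvSp cs).1 :: (pvSp cs).2.map pvRow := by
  unfold formatCells_alt
  rw [String.toList_ofList, List.foldl_reverse, pvFoldr_spec]
  simp [Function.comp]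

-- ===== VERDICT (by name: the statement is the Claim_ definition above) =====
theorem formatCells_spec : Claim_equal_formatCells := by
  intro s _
  unfold Spec_formatCells formatCells
  rw [show s = String.ofList s.toList from (@String.ofList_toList s).symm, pvAlt_eq]
  simpa using pvFold_spec s.toList [] []
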